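-- pv_equiv track=rewrite | github.com/prinpice/Algorithm-Practice | Programmers/영어 끝말잇기.py | solution
-- ===== SOURCE A (Python) =====
-- def solution(n, words):
--     answer = []
--     turn = 1
--     person = 1
--     visited = []
--     for idx, word in enumerate(words):
--         if word in visited:
--             return [person, turn]
--         if idx == len(words)-1:
--             # return [0, 0]
--             answer = [0, 0]
--             break
--         if word[-1] != words[idx+1][0]:
--             if person == n:
--                 return [1, turn + 1]
--             else:
--                 return [person+1, turn]
--         visited.append(word)
--         person += 1
--         if person > n:
--             person = 1
--             turn += 1
--
--     return answer
-- ===== SOURCE B (Python) =====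
-- def solution(n, words):
--     if not words:
--         return []
--     # Stage 1: first index whose word already occurred, else len(words).
--     seen = set()
--     dup = len(words)
--     for i, w in enumerate(words):
--         if w in seen:
--             dup = i
--             break
--         seen.add(w)
--     # Stage 2: first index whose word does not chain from the previous one, else len(words).
--     mism = len(words)
--     for i in range(1, len(words)):
--         if words[i - 1][-1:] != words[i][:1]:
--             mism = i
--             break
--     bad = min(dup, mism)
--     if bad == len(words):
--         return [0, 0]
--     return [bad % n + 1, bad // n + 1]
-- ===== Notes on version B (the rewrite author's own statement) =====
-- stated objective: alternative
-- what changed: Replaces A's single early-returning scan with running person/turn counters and a look-ahead chain test by two independent staged scans (first duplicate index via a set, first broken-chain index via slice comparison), combined with min and converted to the answer in closed form [bad % n + 1, bad // n + 1].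
-- outside the precondition, e.g. on solution(0, ['ab', 'ca']): A returns [2, 1], B raises ZeroDivisionError; on solution(-3, ['ab', 'ba', 'ab']): A returns [1, 3], B returns [0, 0]
import Mathlib
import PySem

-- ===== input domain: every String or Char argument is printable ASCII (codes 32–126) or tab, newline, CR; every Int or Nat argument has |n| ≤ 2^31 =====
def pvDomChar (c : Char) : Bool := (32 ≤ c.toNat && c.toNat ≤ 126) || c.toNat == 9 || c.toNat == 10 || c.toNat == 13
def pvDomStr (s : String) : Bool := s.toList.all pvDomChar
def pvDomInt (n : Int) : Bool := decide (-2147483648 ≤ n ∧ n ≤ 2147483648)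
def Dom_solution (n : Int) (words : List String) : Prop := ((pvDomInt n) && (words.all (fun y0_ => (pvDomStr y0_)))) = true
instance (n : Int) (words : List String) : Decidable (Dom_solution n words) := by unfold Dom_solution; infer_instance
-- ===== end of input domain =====

-- B replaces A's single early-returning scan (running person/turn counters, look-ahead chain test)
-- by two independent staged scans — first duplicate index, first broken-chain index — combined with
-- min and converted to the answer in closed form (objective: alternative).

-- ===== PORT A =====
def solutionGo (n : Int) (words : List String) :
    List String → Nat → Int → Int → List String → List Int
  | [], _, _, _, _ => []
  | word :: rest, idx, person, turn, visited =>
    if word ∈ visited then [person, turn]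
    else if (idx : Int) = (words.length : Int) - 1 then [0, 0]
    else if PySem.Str.pyGet? word (-1)
         ≠ ((PySem.List.pyGet? words ((idx : Int) + 1)).bind fun w => PySem.Str.pyGet? w 0) then
      if person = n then [1, turn + 1] else [person + 1, turn]
    else
      if person + 1 > n then solutionGo n words rest (idx + 1) 1 (turn + 1) (visited ++ [word])
      else solutionGo n words rest (idx + 1) (person + 1) turn (visited ++ [word])

def solution (n : Int) (words : List String) : List Int :=
  solutionGo n words words 0 1 1 []

-- ===== PORT B =====
-- Stage 1 of Source B: first index whose word already occurred (a set of seen words), else len(words).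
def solutionDup : List String → Nat → PySem.Set String → Nat → Nat
  | [], _, _, len => len
  | w :: rest, i, seen, len =>
    if PySem.Set.contains seen w then i
    else solutionDup rest (i + 1) (PySem.Set.add seen w) len

-- Source B's chain test 'words[i-1][-1:] != words[i][:1]' (indices in range, so getD is exact).
def solutionMismAt (words : List String) (i : Nat) : Bool :=
  decide (PySem.Str.slice (words.getD (i - 1) "") (some (-1)) none
          ≠ PySem.Str.slice (words.getD i "") none (some 1))

-- Stage 2 of Source B: first index whose word does not chain from the previous one, else len(words).
def solutionMism (words : List String) (i : Nat) : Nat :=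
  if i < words.length then
    (if solutionMismAt words i then i else solutionMism words (i + 1))
  else words.length
termination_by words.length - i

def solution_alt (n : Int) (words : List String) : List Int :=
  if words = [] then []
  else
    let dup := solutionDup words 0 PySem.Set.empty words.length
    let mism := solutionMism words 1
    let bad := min dup mism
    if bad = words.length then [0, 0]
    else [PySem.Int.mod (bad : Int) n + 1, PySem.Int.floordiv (bad : Int) n + 1]

-- ===== PRECONDITION & SPEC =====
-- Pre_ restricts to the game's natural domain of n ≥ 1 players (for n ≤ 0 there is no game: A's
-- counter bookkeeping returns accidental blame positions and B's '% n' raises ZeroDivisionError at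
-- n = 0; lists with no repetition and no chain break stay admitted for every n, both return [0, 0])
-- and excludes exactly the inputs on which A raises IndexError: an empty word in a chain-check
-- position the scan actually reaches (no repetition or mismatch stops it first).
def Pre_solution (n : Int) (words : List String) : Prop :=
  (1 ≤ n ∨
    ((∀ i ∈ Finset.range words.length, words.getD i "" ∉ words.take i) ∧
     (∀ i ∈ Finset.range (words.length - 1),
        PySem.Str.pyGet? (words.getD i "") (-1) = PySem.Str.pyGet? (words.getD (i + 1) "") 0))) ∧
  ¬ ∃ i ∈ Finset.range words.length, i + 1 < words.length ∧
      (words.getD i "" = "" ∨ words.getD (i + 1) "" = "") ∧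
      (∀ j ∈ Finset.range (i + 1), words.getD j "" ∉ words.take j) ∧
      (∀ j ∈ Finset.range i, words.getD j "" ≠ "" ∧
        PySem.Str.pyGet? (words.getD j "") (-1) = PySem.Str.pyGet? (words.getD (j + 1) "") 0)
instance (n : Int) (words : List String) : Decidable (Pre_solution n words) := by
  unfold Pre_solution; infer_instance

def pvWitness_solution : Int × List String := (2, ["ab", "ba", "ab"])

def Spec_solution (n : Int) (words : List String) (out : List Int) : Prop := out = solution_alt n words
instance (n : Int) (words : List String) (out : List Int) : Decidable (Spec_solution n words out) := by
  unfold Spec_solution; infer_instance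

-- ===== CLAIM (what is proved, stated in full; the proofs are below) =====
def Claim_equal_solution : Prop := ∀ (n : Int) (words : List String),
  Dom_solution n words → Pre_solution n words → Spec_solution n words (solution n words)

-- ===== LEMMAS AND PROOFS =====

-- Proof-side middle form: the single pass with look-behind mismatch test and closed-form answers.
def pvPass (n : Int) (words : List String) :
    List String → Nat → PySem.Set String → List Int
  | [], _, _ => [0, 0]
  | word :: rest, idx, seen =>
    if PySem.Set.contains seen word
       || (decide (0 < idx)
           && decide (((PySem.List.pyGet? words ((idx : Int) - 1)).bind fun p => PySem.Str.pyGet? p (-1))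
                      ≠ PySem.Str.pyGet? word 0)) then
      [PySem.Int.mod (idx : Int) n + 1, PySem.Int.floordiv (idx : Int) n + 1]
    else pvPass n words rest (idx + 1) (PySem.Set.add seen word)

lemma pv_step_arith (n a : Int) (hn : 1 ≤ n) :
    (a % n + 1 = n → (a + 1) % n = 0 ∧ (a + 1) / n = a / n + 1)
    ∧ (a % n + 1 ≠ n → (a + 1) % n = a % n + 1 ∧ (a + 1) / n = a / n) := by
  have hpos : (0:Int) < n := by omega
  have hd := Int.mul_ediv_add_emod a n
  have h1 : 0 ≤ a % n := Int.emod_nonneg a (by omega)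
  have h2 : a % n < n := Int.emod_lt_of_pos a hpos
  constructor
  · intro hc
    have h := (Int.ediv_emod_unique (a := a + 1) (b := n) (r := 0) (q := a / n + 1) hpos).mpr
      ⟨by rw [mul_add]; omega, by omega, by omega⟩
    exact ⟨h.2, h.1⟩
  · intro hc
    have h := (Int.ediv_emod_unique (a := a + 1) (b := n) (r := a % n + 1) (q := a / n) hpos).mpr
      ⟨by omega, by omega, by omega⟩
    exact ⟨h.2, h.1⟩

lemma pv_get_of_drop (words rest : List String) (word : String) (idx : Nat)
    (h : words.drop idx = word :: rest) :
    PySem.List.pyGet? words (idx : Int) = some word := by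
  rw [PySem.List.pyGet?_natCast]
  have h2 : (words.drop idx).head? = words[idx]? := List.head?_drop
  rw [h] at h2; simp at h2; simp [h2]

lemma pv_go_eq (n : Int) (hn : 1 ≤ n) (words : List String) :
    ∀ (rest : List String) (idx : Nat) (visited : List String),
      words.drop idx = rest → rest ≠ [] →
      (0 < idx →
        ((PySem.List.pyGet? words ((idx : Int) - 1)).bind fun p => PySem.Str.pyGet? p (-1))
          = PySem.Str.pyGet? rest.headI 0) →
      solutionGo n words rest idx ((idx : Int) % n + 1) ((idx : Int) / n + 1) visited
        = pvPass n words rest idx visited := by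
  have hpos : (0:Int) < n := by omega
  intro rest
  induction rest with
  | nil => intro idx visited _ hne _; exact absurd rfl hne
  | cons word rest' IH =>
    intro idx visited hdrop _ hchain
    have hget : PySem.List.pyGet? words (idx : Int) = some word := pv_get_of_drop _ _ _ _ hdrop
    have hlen : words.length = idx + 1 + rest'.length := by
      have h := congrArg List.length hdrop
      simp [List.length_drop] at h
      by_cases hle : idx < words.length
      · omega
      · rw [List.drop_eq_nil_of_le (by omega)] at hdrop; exact absurd hdrop (by simp)
    have hdrop' : words.drop (idx + 1) = rest' := by
      have h : words.drop (idx + 1) = (words.drop idx).drop 1 := by rw [List.drop_drop]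
      rw [h, hdrop]; rfl
    have hb : (decide (0 < idx)
           && decide (((PySem.List.pyGet? words ((idx : Int) - 1)).bind fun p => PySem.Str.pyGet? p (-1))
                      ≠ PySem.Str.pyGet? word 0)) = false := by
      rcases Nat.eq_zero_or_pos idx with h0 | h0
      · subst h0; simp
      · have heq := hchain h0
        simp only [List.headI_cons] at heq
        rw [Bool.and_eq_false_iff]
        right
        rw [heq]
        simp
    by_cases hmem : word ∈ visited
    · rw [solutionGo, pvPass, if_pos hmem, if_pos (by simp [PySem.Set.contains, hmem])]
      rw [PySem.Int.mod_eq_emod_of_pos hpos, PySem.Int.floordiv_eq_ediv_of_pos hpos]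
    · have hcontains : PySem.Set.contains visited word = false := by
        simp [PySem.Set.contains, hmem]
      have hadd : PySem.Set.add visited word = visited ++ [word] := by
        simp [PySem.Set.add, PySem.Set.contains, hmem]
      by_cases hlast : (idx : Int) = (words.length : Int) - 1
      · have hr : rest' = [] := List.eq_nil_of_length_eq_zero (by omega)
        subst hr
        rw [solutionGo, if_neg hmem, if_pos hlast]
        conv_rhs => rw [pvPass, hcontains, hb, Bool.or_self,
          if_neg Bool.false_ne_true, pvPass]
      · have hne' : rest' ≠ [] := by
          intro h; subst h; rw [hlen] at hlast; simp at hlast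
        obtain ⟨w', rest'', rfl⟩ : ∃ w' rest'', rest' = w' :: rest'' := by
          cases rest' with
          | nil => exact absurd rfl hne'
          | cons a b => exact ⟨a, b, rfl⟩
        have hget' : PySem.List.pyGet? words ((idx : Int) + 1) = some w' := by
          have h := pv_get_of_drop words rest'' w' (idx + 1) hdrop'
          push_cast at h
          exact h
        have harith := pv_step_arith n (idx : Int) hn
        have hm1 : (idx : Int) % n < n := Int.emod_lt_of_pos _ hpos
        have hm0 : 0 ≤ (idx : Int) % n := Int.emod_nonneg _ (by omega)
        by_cases hmis : PySem.Str.pyGet? word (-1)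
            ≠ ((PySem.List.pyGet? words ((idx : Int) + 1)).bind fun w => PySem.Str.pyGet? w 0)
        · have hBnext : pvPass n words (w' :: rest'') (idx + 1) (PySem.Set.add visited word)
              = [((idx : Int) + 1) % n + 1, ((idx : Int) + 1) / n + 1] := by
            rw [pvPass]
            rw [if_pos ?hc]
            case hc =>
              rw [Bool.or_eq_true]
              right
              rw [Bool.and_eq_true]
              refine ⟨by simp, ?_⟩
              rw [decide_eq_true_eq]
              have hcast : ((idx + 1 : Nat) : Int) - 1 = (idx : Int) := by push_cast; ring
              rw [hcast, hget]
              rw [hget'] at hmis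
              simp only [Option.bind_some] at hmis ⊢
              exact hmis
            rw [PySem.Int.mod_eq_emod_of_pos hpos, PySem.Int.floordiv_eq_ediv_of_pos hpos]
            push_cast
            rfl
          rw [solutionGo, if_neg hmem, if_neg hlast, if_pos hmis]
          conv_rhs => rw [pvPass, hcontains, hb, Bool.or_self,
            if_neg Bool.false_ne_true, hBnext]
          split_ifs with hc
          · have h1 := harith.1 (by omega)
            rw [h1.1, h1.2]
            simp
          · have h2 := harith.2 (by omega)
            rw [h2.1, h2.2]
        · rw [not_not] at hmis
          have hchain' : 0 < idx + 1 →
              ((PySem.List.pyGet? words (((idx + 1 : Nat) : Int) - 1)).bind fun p => PySem.Str.pyGet? p (-1))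
                = PySem.Str.pyGet? ((w' :: rest'').headI) 0 := by
            intro _
            have hcast : ((idx + 1 : Nat) : Int) - 1 = (idx : Int) := by push_cast; ring
            rw [hcast, hget, List.headI_cons]
            rw [hget'] at hmis
            simpa using hmis
          have hIH := IH (idx + 1) (visited ++ [word]) hdrop' (by simp) hchain'
          rw [solutionGo, if_neg hmem, if_neg hlast, if_neg (not_not_intro hmis)]
          conv_rhs => rw [pvPass, hcontains, hb, Bool.or_self,
            if_neg Bool.false_ne_true, hadd]
          split_ifs with hc
          · have h1 := harith.1 (by omega)
            push_cast at hIH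
            rw [h1.1, h1.2] at hIH
            simpa using hIH
          · have h2 := harith.2 (by omega)
            push_cast at hIH
            rw [h2.1, h2.2] at hIH
            exact hIH

-- The slice comparison of Source B agrees with the option-valued character comparison.
lemma pv_lcmp (l m : List Char) :
    (PySem.List.slice l (some (-1)) none = PySem.List.slice m none (some 1))
      ↔ (PySem.List.pyGet? l (-1) = PySem.List.pyGet? m 0) := by
  rw [PySem.List.slice_from_neg_one]
  rw [show (some (1:Int)) = some ((1:Nat):Int) from by norm_num]
  rw [PySem.List.slice_to_natCast, PySem.List.pyGet?_neg_one, PySem.List.pyGet?_zero]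
  rcases List.eq_nil_or_concat l with rfl | ⟨xs, x, rfl⟩
  · cases m <;> simp
  · rw [List.concat_eq_append]
    have hd : (xs ++ [x]).drop ((xs ++ [x]).length - 1) = [x] := by
      simp
    rw [hd]
    cases m <;> simp

lemma pv_slice_cmp (s t : String) :
    (PySem.Str.slice s (some (-1)) none = PySem.Str.slice t none (some 1))
      ↔ (PySem.Str.pyGet? s (-1) = PySem.Str.pyGet? t 0) := by
  rw [← String.toList_inj, PySem.Str.toList_slice, PySem.Str.toList_slice,
    PySem.Str.pyGet?_eq, PySem.Str.pyGet?_eq]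
  simpa using pv_lcmp s.toList t.toList

lemma pv_dup_ge (rest : List String) : ∀ (i : Nat) (seen : PySem.Set String) (len : Nat),
    i + rest.length ≤ len → i ≤ solutionDup rest i seen len := by
  induction rest with
  | nil => intro i seen len h; rw [solutionDup]; omega
  | cons w rest IH =>
    intro i seen len h
    rw [solutionDup]
    split_ifs with hc
    · exact le_rfl
    · exact le_trans (Nat.le_succ i) (IH (i + 1) _ len (by simp at h ⊢; omega))

lemma pv_mism_ge (words : List String) (i : Nat) (h : i ≤ words.length) :
    i ≤ solutionMism words i := by
  have key : ∀ (k i : Nat), words.length - i ≤ k → i ≤ words.length → i ≤ solutionMism words i := by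
    intro k
    induction k with
    | zero =>
      intro i hk hi
      rw [solutionMism, if_neg (by omega)]
      exact hi
    | succ k IH =>
      intro i hk hi
      rw [solutionMism]
      split_ifs with h1 h2
      · exact le_rfl
      · exact le_trans (Nat.le_succ i) (IH (i + 1) (by omega) (by omega))
      · exact hi
  exact key (words.length - i) i le_rfl h

lemma pv_pass_staged (n : Int) (words : List String) :
    ∀ (rest : List String) (idx : Nat) (seen : PySem.Set String),
      words.drop idx = rest →
      pvPass n words rest idx seen =
        (if min (solutionDup rest idx seen words.length) (solutionMism words (max idx 1))
            = words.length then [0, 0]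
         else [PySem.Int.mod ((min (solutionDup rest idx seen words.length)
                  (solutionMism words (max idx 1)) : Nat) : Int) n + 1,
               PySem.Int.floordiv ((min (solutionDup rest idx seen words.length)
                  (solutionMism words (max idx 1)) : Nat) : Int) n + 1]) := by
  intro rest
  induction rest with
  | nil =>
    intro idx seen hdrop
    have hlen : words.length ≤ idx := by
      by_contra hlt
      have := congrArg List.length hdrop
      simp [List.length_drop] at this
      omega
    have hmax : ¬ max idx 1 < words.length := by
      have := Nat.le_max_left idx 1; omega
    rw [pvPass, solutionDup, solutionMism, if_neg hmax, Nat.min_self, if_pos rfl]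
  | cons word rest' IH =>
    intro idx seen hdrop
    have hget : PySem.List.pyGet? words (idx : Int) = some word := pv_get_of_drop _ _ _ _ hdrop
    have hlen : words.length = idx + 1 + rest'.length := by
      have h := congrArg List.length hdrop
      simp [List.length_drop] at h
      by_cases hle : idx < words.length
      · omega
      · rw [List.drop_eq_nil_of_le (by omega)] at hdrop; exact absurd hdrop (by simp)
    have hidx : idx < words.length := by omega
    have hdrop' : words.drop (idx + 1) = rest' := by
      have h : words.drop (idx + 1) = (words.drop idx).drop 1 := by rw [List.drop_drop]
      rw [h, hdrop]; rfl
    have hgetD : words.getD idx "" = word := by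
      have h1 : words[idx]? = some word := by
        have := hget; rwa [PySem.List.pyGet?_natCast] at this
      rw [List.getD_eq_getElem?_getD, h1]; rfl
    rw [pvPass, solutionDup]
    by_cases hcont : PySem.Set.contains seen word
    · rw [if_pos (by rw [hcont]; simp), if_pos hcont]
      have hm : idx ≤ solutionMism words (max idx 1) := by
        rcases Nat.eq_zero_or_pos idx with h0 | h0
        · omega
        · rw [Nat.max_eq_left h0]; exact pv_mism_ge words idx (by omega)
      rw [Nat.min_eq_left hm] at *
      rw [if_neg (by omega)]
    · have hcontf : PySem.Set.contains seen word = false := by simpa using hcont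
      rw [if_neg hcont]
      rcases Nat.eq_zero_or_pos idx with h0 | h0
      · subst h0
        rw [if_neg (by rw [hcontf]; simp)]
        simpa using IH 1 (PySem.Set.add seen word) hdrop'
      · -- idx ≥ 1: bridge the look-behind option test with Source B's slice test
        have hprev : PySem.List.pyGet? words ((idx : Int) - 1)
            = some (words.getD (idx - 1) "") := by
          have hcast : ((idx : Int) - 1) = ((idx - 1 : Nat) : Int) := by omega
          rw [hcast, PySem.List.pyGet?_natCast, List.getD_eq_getElem?_getD,
            List.getElem?_eq_getElem (by omega)]
          rfl
        have hbridge : (decide (0 < idx)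
            && decide (((PySem.List.pyGet? words ((idx : Int) - 1)).bind fun p => PySem.Str.pyGet? p (-1))
                       ≠ PySem.Str.pyGet? word 0)) = solutionMismAt words idx := by
          unfold solutionMismAt
          rw [hprev, decide_eq_true h0, Bool.true_and, hgetD]
          simp only [Option.bind_some]
          exact decide_eq_decide.mpr (not_iff_not.mpr (pv_slice_cmp _ _)).symm
        rw [hbridge]
        by_cases hm : solutionMismAt words idx
        · rw [if_pos (by rw [hcontf, hm]; simp)]
          have hmv : solutionMism words (max idx 1) = idx := by
            rw [Nat.max_eq_left h0, solutionMism, if_pos hidx, if_pos hm]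
          have hd : idx + 1 ≤ solutionDup rest' (idx + 1) (PySem.Set.add seen word) words.length :=
            pv_dup_ge rest' (idx + 1) _ words.length (by omega)
          rw [hmv, Nat.min_eq_right (by omega)]
          rw [if_neg (by omega)]
        · have hmf : solutionMismAt words idx = false := by simpa using hm
          rw [if_neg (by rw [hcontf, hmf]; simp)]
          have hmv : solutionMism words (max idx 1) = solutionMism words (max (idx + 1) 1) := by
            rw [Nat.max_eq_left h0, Nat.max_eq_left (by omega), solutionMism,
              if_pos hidx, if_neg hm]
          rw [hmv]
          exact IH (idx + 1) (PySem.Set.add seen word) hdrop'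

-- No-event inputs: no duplicate and every boundary chains — A's scan reaches the end, B's two
-- stages both return words.length.
lemma pv_go_noevent (n : Int) (words : List String)
    (hnd : ∀ i ∈ Finset.range words.length, words.getD i "" ∉ words.take i)
    (hch : ∀ i ∈ Finset.range (words.length - 1),
        PySem.Str.pyGet? (words.getD i "") (-1) = PySem.Str.pyGet? (words.getD (i + 1) "") 0) :
    ∀ (rest : List String) (idx : Nat) (visited : List String),
      words.drop idx = rest → rest ≠ [] → visited = words.take idx →
      ∀ (person turn : Int), solutionGo n words rest idx person turn visited = [0, 0] := by
  intro rest
  induction rest with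
  | nil => intro idx visited _ hne _; exact fun _ _ => absurd rfl hne
  | cons word rest' IH =>
    intro idx visited hdrop _ hvis person turn
    have hget : PySem.List.pyGet? words (idx : Int) = some word := pv_get_of_drop _ _ _ _ hdrop
    have hlen : words.length = idx + 1 + rest'.length := by
      have h := congrArg List.length hdrop
      simp [List.length_drop] at h
      by_cases hle : idx < words.length
      · omega
      · rw [List.drop_eq_nil_of_le (by omega)] at hdrop; exact absurd hdrop (by simp)
    have hdrop' : words.drop (idx + 1) = rest' := by
      have h : words.drop (idx + 1) = (words.drop idx).drop 1 := by rw [List.drop_drop]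
      rw [h, hdrop]; rfl
    have hgetE : words[idx]? = some word := by
      have := hget; rwa [PySem.List.pyGet?_natCast] at this
    have hgetD : words.getD idx "" = word := by
      rw [List.getD_eq_getElem?_getD, hgetE]; rfl
    have hmem : word ∉ visited := by
      rw [hvis, ← hgetD]
      exact hnd idx (Finset.mem_range.mpr (by omega))
    have hvis' : visited ++ [word] = words.take (idx + 1) := by
      rw [hvis, List.take_add_one, hgetE]; rfl
    rw [solutionGo, if_neg hmem]
    by_cases hlast : (idx : Int) = (words.length : Int) - 1
    · rw [if_pos hlast]
    · rw [if_neg hlast]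
      have hne' : rest' ≠ [] := by
        intro h; subst h; rw [hlen] at hlast; simp at hlast
      obtain ⟨w', rest'', rfl⟩ : ∃ w' rest'', rest' = w' :: rest'' := by
        cases rest' with
        | nil => exact absurd rfl hne'
        | cons a b => exact ⟨a, b, rfl⟩
      have hget' : words[idx + 1]? = some w' := by
        have h := pv_get_of_drop words rest'' w' (idx + 1) hdrop'
        rwa [PySem.List.pyGet?_natCast] at h
      have hgetD' : words.getD (idx + 1) "" = w' := by
        rw [List.getD_eq_getElem?_getD, hget']; rfl
    -- the boundary (idx, idx+1) chains, so the mismatch branch does not fire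
      have hc := hch idx (Finset.mem_range.mpr (by omega))
      rw [hgetD, hgetD'] at hc
      have hnofire : ¬ (PySem.Str.pyGet? word (-1)
          ≠ ((PySem.List.pyGet? words ((idx : Int) + 1)).bind fun w => PySem.Str.pyGet? w 0)) := by
        rw [not_not]
        have hcast : ((idx : Int) + 1) = ((idx + 1 : Nat) : Int) := by push_cast; ring
        rw [hcast, PySem.List.pyGet?_natCast, hget', Option.bind_some]
        exact hc
      rw [if_neg hnofire]
      split_ifs with hp
      · exact IH (idx + 1) (visited ++ [word]) hdrop' (by simp) hvis' 1 (turn + 1)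
      · exact IH (idx + 1) (visited ++ [word]) hdrop' (by simp) hvis' (person + 1) turn

lemma pv_dup_noevent (words : List String)
    (hnd : ∀ i ∈ Finset.range words.length, words.getD i "" ∉ words.take i) :
    ∀ (rest : List String) (i : Nat) (seen : List String),
      words.drop i = rest → seen = words.take i →
      solutionDup rest i seen words.length = words.length := by
  intro rest
  induction rest with
  | nil => intro i seen _ _; rw [solutionDup]
  | cons word rest' IH =>
    intro i seen hdrop hseen
    have hget : PySem.List.pyGet? words (i : Int) = some word := pv_get_of_drop _ _ _ _ hdrop
    have hlen : words.length = i + 1 + rest'.length := by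
      have h := congrArg List.length hdrop
      simp [List.length_drop] at h
      by_cases hle : i < words.length
      · omega
      · rw [List.drop_eq_nil_of_le (by omega)] at hdrop; exact absurd hdrop (by simp)
    have hdrop' : words.drop (i + 1) = rest' := by
      have h : words.drop (i + 1) = (words.drop i).drop 1 := by rw [List.drop_drop]
      rw [h, hdrop]; rfl
    have hgetE : words[i]? = some word := by
      have := hget; rwa [PySem.List.pyGet?_natCast] at this
    have hgetD : words.getD i "" = word := by
      rw [List.getD_eq_getElem?_getD, hgetE]; rfl
    have hmem : word ∉ seen := by
      rw [hseen, ← hgetD]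
      exact hnd i (Finset.mem_range.mpr (by omega))
    have hcontf : PySem.Set.contains seen word = false := by
      simp [PySem.Set.contains, hmem]
    have hadd : PySem.Set.add seen word = seen ++ [word] := by
      simp [PySem.Set.add, PySem.Set.contains, hmem]
    have hseen' : seen ++ [word] = words.take (i + 1) := by
      rw [hseen, List.take_add_one, hgetE]; rfl
    rw [solutionDup, if_neg (by rw [hcontf]; simp), hadd]
    exact IH (i + 1) (seen ++ [word]) hdrop' hseen'

lemma pv_mism_noevent (words : List String)
    (hch : ∀ i ∈ Finset.range (words.length - 1),
        PySem.Str.pyGet? (words.getD i "") (-1) = PySem.Str.pyGet? (words.getD (i + 1) "") 0) :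
    ∀ (k i : Nat), words.length - i ≤ k → 1 ≤ i → solutionMism words i = words.length := by
  intro k
  induction k with
  | zero => intro i hk _; rw [solutionMism, if_neg (by omega)]
  | succ k IH =>
    intro i hk hi
    rw [solutionMism]
    split_ifs with h1 h2
    · exfalso
      have hc := hch (i - 1) (Finset.mem_range.mpr (by omega))
      have hcast : i - 1 + 1 = i := by omega
      rw [hcast] at hc
      have : solutionMismAt words i = false := by
        unfold solutionMismAt
        rw [decide_eq_false_iff_not, not_not]
        exact (pv_slice_cmp _ _).mpr hc
      rw [this] at h2
      exact Bool.false_ne_true h2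
    · exact IH (i + 1) (by omega) (by omega)
    · rfl

-- ===== VERDICT (by name: the statement is the Claim_ definition above) =====
theorem solution_spec : Claim_equal_solution := by
  intro n words _ hpre
  obtain ⟨hn | ⟨hnd, hch⟩, -⟩ := hpre
  case inr =>
    -- no-event inputs: both sides return [0, 0] (or [] on the empty list)
    unfold Spec_solution
    cases words with
    | nil => rfl
    | cons w ws =>
      have hA := pv_go_noevent n (w :: ws) hnd hch (w :: ws) 0 [] (by simp) (by simp) rfl 1 1
      have hD := pv_dup_noevent (w :: ws) hnd (w :: ws) 0 [] (by simp) rfl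
      have hM := pv_mism_noevent (w :: ws) hch ((w :: ws).length - 1) 1 (by omega) le_rfl
      rw [solution, hA, solution_alt, if_neg (by simp)]
      have he : (PySem.Set.empty : PySem.Set String) = ([] : List String) := rfl
      simp only [he, hD, hM, Nat.min_self, if_true]
  unfold Spec_solution
  cases words with
  | nil => rfl
  | cons w ws =>
    have h1 := pv_go_eq n hn (w :: ws) (w :: ws) 0 [] (by simp) (by simp)
      (fun h0 => absurd h0 (by simp))
    have h2 := pv_pass_staged n (w :: ws) (w :: ws) 0 PySem.Set.empty (by simp)
    rw [solution, solution_alt, if_neg (by simp)]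
    have he : (PySem.Set.empty : PySem.Set String) = ([] : List String) := rfl
    rw [he] at h2
    simp only [Nat.max_eq_right (by omega : (0:Nat) ≤ 1)] at h2
    simpa using h1.trans h2
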